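-- pv_equiv track=rewrite | github.com/alexandraback/datacollection | solutions_5658282861527040_1/Python/xmk/b.py | work2
-- ===== SOURCE A (Python) =====
-- def work2(A,B,K):
--     b = 1
--     ma = max(A,B)
--     if ma <= K:
--         return (A+1)*(B+1)
--
--     while b <= ma:
--         b<<=1
--     m = b-1
--     b >>=1
--     rtn = 0
--     Ab=A&b
--     Bb=B&b
--     if Ab and Bb:
--         if K >= b:
--             rtn += b*(A+B-b+2)
--             rtn += work2(A-b, B-b, K-b)
--         else:
--             rtn += work2(b-1, b-1, K)
--             rtn += work2(b-1, B-Bb , K)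
--             rtn += work2(A-Ab, b-1 , K)
--     elif Ab:
--         rtn += work2(b-1, B, K)
--         rtn += work2(A-b, B, K)
--     else:
--         rtn += work2(A, b-1, K)
--         rtn += work2(A, B-b, K)
--     return rtn
-- ===== SOURCE B (Python) =====
-- def work2(A, B, K):
--     # Same recurrence evaluated without a call stack: an explicit worklist of
--     # subproblems and a running total of each node's closed-form contribution,
--     # so no values are returned or summed up a recursion tree.
--     total = 0
--     todo = [(A, B, K)]
--     while todo:
--         a, b, k = todo.pop()
--         if max(a, b) <= k:
--             total += (a + 1) * (b + 1)
--             continue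
--         hi = 1 << (max(a, b).bit_length() - 1)
--         ahi = a & hi
--         bhi = b & hi
--         if ahi and bhi:
--             if k >= hi:
--                 total += hi * (a + b + 2 - hi)
--                 todo.append((a - hi, b - hi, k - hi))
--             else:
--                 todo.append((hi - 1, hi - 1, k))
--                 todo.append((hi - 1, b - bhi, k))
--                 todo.append((a - ahi, hi - 1, k))
--         elif ahi:
--             todo.append((hi - 1, b, k))
--             todo.append((a - hi, b, k))
--         else:
--             todo.append((a, hi - 1, k))
--             todo.append((a, b - hi, k))
--     return total
-- ===== Notes on version B (the rewrite author's own statement) =====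
-- stated objective: alternative
-- what changed: Replaces A's recursion (results summed up a call tree) by an iterative worklist: an explicit stack of pending subproblems and one running total to which each subproblem's closed-form contribution is added, with the top bit found via bit_length instead of A's doubling loop.
import Mathlib
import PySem

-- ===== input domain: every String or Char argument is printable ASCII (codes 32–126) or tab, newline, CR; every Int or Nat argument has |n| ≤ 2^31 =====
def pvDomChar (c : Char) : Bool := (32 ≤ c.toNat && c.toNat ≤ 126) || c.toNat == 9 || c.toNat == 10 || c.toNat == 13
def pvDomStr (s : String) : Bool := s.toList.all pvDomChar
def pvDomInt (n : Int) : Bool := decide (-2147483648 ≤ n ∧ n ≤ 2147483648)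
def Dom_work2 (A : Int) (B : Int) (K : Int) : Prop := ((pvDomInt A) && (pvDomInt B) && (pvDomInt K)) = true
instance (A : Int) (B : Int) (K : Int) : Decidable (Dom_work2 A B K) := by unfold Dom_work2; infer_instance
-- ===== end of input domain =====

-- B replaces A's recursion by an explicit worklist of subproblems with a running total of
-- closed-form contributions (same recurrence, iterative decomposition; same cost).

-- ===== PORT A =====
-- Python A recurses without bound (for K < 0 with max A B > K it never returns), so the
-- port carries an explicit fuel; fuel 64 is enough for every input admitted by Pre_work2
-- inside Dom_work2 (the recursion depth is bounded by the bit length of max A B + 1 ≤ 33).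

-- `b = 1; while b <= ma: b <<= 1`  (fuel 64 suffices: 1 doubles past ma ≤ 2^63 within 64 steps)
def work2Loop : Nat → Int → Int → Int
  | 0, _, b => b
  | fuel+1, ma, b => if b ≤ ma then work2Loop fuel ma (b <<< (1:Nat)) else b

def work2F : Nat → Int → Int → Int → Int
  | 0, _, _, _ => 0   -- fuel exhausted (unreachable when fuel > bit length of max A B)
  | fuel+1, A, B, K =>
    let ma := max A B
    if ma ≤ K then (A+1)*(B+1)
    else
      -- `while b <= ma: b <<= 1` ; the Python's `m = b-1` is dead; `b >>= 1`
      let b := (work2Loop 64 ma 1) >>> (1:Nat)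
      let Ab := PySem.Int.band A b    -- A & b (PySem.Int.band is Python-exact `&`)
      let Bb := PySem.Int.band B b    -- B & b
      if Ab ≠ 0 ∧ Bb ≠ 0 then        -- `if Ab and Bb:`
        if K ≥ b then
          b*(A+B-b+2) + work2F fuel (A-b) (B-b) (K-b)
        else
          work2F fuel (b-1) (b-1) K + work2F fuel (b-1) (B-Bb) K + work2F fuel (A-Ab) (b-1) K
      else if Ab ≠ 0 then            -- `elif Ab:`
        work2F fuel (b-1) B K + work2F fuel (A-b) B K
      else
        work2F fuel A (b-1) K + work2F fuel A (B-b) K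

def work2 (A : Int) (B : Int) (K : Int) : Int := work2F 64 A B K

-- ===== PORT B =====
-- Transliteration of Source B: one iteration of the `while todo:` body — pops (a,b,k), and
-- returns (what is added to `total`, the frames pushed onto `todo`, top of stack first:
-- Python pushes with .append and pops from the end, so the last append is listed first).
def work2Step (a : Int) (b : Int) (k : Int) : Int × List (Int × Int × Int) :=
  if max a b ≤ k then ((a + 1) * (b + 1), [])
  else
    -- `hi = 1 << (max(a, b).bit_length() - 1)`  (bit_length via Nat.size; exact for max a b ≥ 1,
    -- which holds whenever this branch is reached on an input admitted by Pre_work2)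
    let hi : Int := (1 : Int) <<< ((max a b).toNat.size - 1)
    let ahi := PySem.Int.band a hi       -- `ahi = a & hi`
    let bhi := PySem.Int.band b hi       -- `bhi = b & hi`
    if ahi ≠ 0 ∧ bhi ≠ 0 then            -- `if ahi and bhi:`
      if k ≥ hi then
        (hi * (a + b + 2 - hi), [(a - hi, b - hi, k - hi)])
      else
        (0, [(a - ahi, hi - 1, k), (hi - 1, b - bhi, k), (hi - 1, hi - 1, k)])
    else if ahi ≠ 0 then                 -- `elif ahi:`
      (0, [(a - hi, b, k), (hi - 1, b, k)])
    else
      (0, [(a, b - hi, k), (a, hi - 1, k)])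

-- `while todo:` with fuel (Python's loop is unbounded; fuel 4^64 covers every input
-- admitted by Pre_work2 inside Dom_work2, see the measure argument in the proofs)
def work2Drain : Nat → List (Int × Int × Int) → Int → Int
  | _, [], total => total
  | 0, _ :: _, total => total   -- fuel exhausted (unreachable under Pre_work2 ∧ Dom_work2)
  | fuel+1, (a, b, k) :: rest, total =>
      let s := work2Step a b k
      work2Drain fuel (s.2 ++ rest) (total + s.1)

def work2_alt (A : Int) (B : Int) (K : Int) : Int := work2Drain (4^64) [(A, B, K)] 0

-- ===== PRECONDITION & SPEC =====
-- Pre_work2 holds exactly where the Python A returns: when K < 0 and max A B > K the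
-- recursion never reaches a base case and A dies with RecursionError; no input on which
-- A returns is excluded.
def Pre_work2 (A : Int) (B : Int) (K : Int) : Prop := 0 ≤ K ∨ max A B ≤ K
instance (A : Int) (B : Int) (K : Int) : Decidable (Pre_work2 A B K) := by
  unfold Pre_work2; infer_instance

def pvWitness_work2 : Int × Int × Int := (3, 5, 2)

def Spec_work2 (A : Int) (B : Int) (K : Int) (out : Int) : Prop := out = work2_alt A B K
instance (A : Int) (B : Int) (K : Int) (out : Int) : Decidable (Spec_work2 A B K out) := by
  unfold Spec_work2; infer_instance

-- ===== CLAIM (what is proved, stated in full; the proofs are below) =====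
def Claim_equal_work2 : Prop := ∀ (A : Int) (B : Int) (K : Int), Dom_work2 A B K → Pre_work2 A B K → Spec_work2 A B K (work2 A B K)

-- ===== LEMMAS AND PROOFS =====

-- recursion measure: bit length of max A B (clamped at 0)
def pvMeas (A B : Int) : Nat := (max A B).toNat.size

-- the canonical value: A's recursion run with just enough fuel
def pvW (A B K : Int) : Int := work2F (pvMeas A B + 1) A B K

lemma pvLoop_done (f : Nat) (ma b : Int) (h : ¬ b ≤ ma) : work2Loop f ma b = b := by
  cases f with
  | zero => rfl
  | succ n => simp [work2Loop, h]

lemma pvLoop_spec : ∀ (f : Nat) (ma b : Int), 0 < b → b ≤ ma → ma < b * 2^f →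
    ∃ t : Nat, work2Loop f ma b = b * 2^(t+1) ∧ b * 2^t ≤ ma ∧ ma < b * 2^(t+1) := by
  intro f
  induction f with
  | zero =>
    intro ma b hb hle hlt
    exfalso; simp at hlt; omega
  | succ n ih =>
    intro ma b hb hle hlt
    have hshift : b <<< (1:Nat) = b * 2 := by
      rw [Int.shiftLeft_eq]; ring
    simp only [work2Loop, if_pos hle, hshift]
    by_cases h2 : b * 2 ≤ ma
    · obtain ⟨t, heq, hlow, hhigh⟩ := ih ma (b*2) (by omega) h2 (by
        have he : b * 2 * 2^n = b * 2^(n+1) := by ring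
        rw [he]; exact hlt)
      refine ⟨t+1, ?_, ?_, ?_⟩
      · rw [heq]; ring
      · calc b * 2^(t+1) = b*2*2^t := by ring
          _ ≤ ma := hlow
      · calc ma < b*2*2^(t+1) := hhigh
          _ = b * 2^(t+1+1) := by ring
    · rw [pvLoop_done n ma (b*2) h2]
      refine ⟨0, by ring, by simpa using hle, by omega⟩

lemma pvShiftr (t : Nat) : ((2:Int)^(t+1)) >>> (1:Nat) = 2^t := by
  rw [Int.shiftRight_eq_div_pow, pow_one, pow_succ]
  exact Int.mul_ediv_cancel _ (by norm_num)

lemma pvToNat_pow (t : Nat) : ((2:Int)^t).toNat = 2^t := by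
  rw [show ((2:Int)^t) = ((2^t : Nat) : Int) by push_cast; ring]
  exact Int.toNat_natCast _

lemma pvBand_cases (x : Int) (t : Nat) (hx : 0 ≤ x) :
    PySem.Int.band x ((2:Int)^t) = 0 ∨ PySem.Int.band x ((2:Int)^t) = 2^t := by
  rw [PySem.Int.band_of_nonneg hx (by positivity), pvToNat_pow, Nat.and_two_pow]
  cases h : x.toNat.testBit t
  · left; simp
  · right; simp

lemma pvBand_nonneg (x : Int) (t : Nat) : 0 ≤ PySem.Int.band x ((2:Int)^t) := by
  rw [PySem.Int.band_comm]
  exact PySem.Int.band_nonneg_of_nonneg_left x (by positivity)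

lemma pvLt_of_band_zero (x : Int) (t : Nat) (hx : 0 ≤ x) (hlt : x < 2^(t+1))
    (hb : PySem.Int.band x ((2:Int)^t) = 0) : x < 2^t := by
  by_contra hge
  rw [not_lt] at hge
  rw [PySem.Int.band_of_nonneg hx (by positivity), pvToNat_pow] at hb
  have h1 : (2^t : Nat) ≤ x.toNat := by
    have hc : ((2^t : Nat) : Int) = (2:Int)^t := by push_cast; ring
    omega
  have h2 : x.toNat < 2^(t+1) := by
    have hc : ((2^(t+1) : Nat) : Int) = (2:Int)^(t+1) := by push_cast; ring
    omega
  have htb : x.toNat.testBit t = true :=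
    Nat.testBit_of_two_pow_le_and_two_pow_add_one_gt h1 h2
  rw [Nat.and_two_pow, htb] at hb
  have hpos : (0:Nat) < 2^t := Nat.two_pow_pos t
  simp at hb

lemma pvMeas_le (x y : Int) (t : Nat) (hx : x < 2^t) (hy : y < 2^t) : pvMeas x y ≤ t := by
  have hc : ((2^t : Nat) : Int) = (2:Int)^t := by push_cast; ring
  have hposN : (0:Nat) < 2^t := Nat.two_pow_pos t
  have hm : max x y < 2^t := max_lt hx hy
  have : (max x y).toNat < 2^t := by omega
  exact Nat.size_le.mpr this

lemma pvEnv (A B K : Int) (hpre : Pre_work2 A B K) (hm : ¬ max A B ≤ K)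
    (hma : (max A B).toNat < 2^64) :
    0 ≤ K ∧ ∃ t : Nat, (work2Loop 64 (max A B) 1) >>> (1:Nat) = 2^t ∧
      (2:Int)^t ≤ max A B ∧ max A B < 2^(t+1) ∧ pvMeas A B = t+1 := by
  have hK : 0 ≤ K := by
    rcases hpre with h | h
    · exact h
    · exact absurd h hm
  have h1 : (1:Int) ≤ max A B := by omega
  have hlt64 : max A B < 2^64 := by
    have hc : ((2^64 : Nat) : Int) = (2:Int)^64 := by norm_num
    omega
  obtain ⟨t, heq, hlow, hhigh⟩ := pvLoop_spec 64 (max A B) 1 one_pos h1 (by simpa using hlt64)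
  have hlow' : (2:Int)^t ≤ max A B := by simpa using hlow
  have hhigh' : max A B < 2^(t+1) := by simpa using hhigh
  refine ⟨hK, t, ?_, hlow', hhigh', ?_⟩
  · rw [heq, show (1:Int) * 2^(t+1) = 2^(t+1) from by ring]
    all_goals exact pvShiftr t
  · have hc : ((2^t : Nat) : Int) = (2:Int)^t := by push_cast; ring
    have hc' : ((2^(t+1) : Nat) : Int) = (2:Int)^(t+1) := by push_cast; ring
    have hge : (2^t : Nat) ≤ (max A B).toNat := by omega
    have hltn : (max A B).toNat < 2^(t+1) := by omega
    have a1 := Nat.size_le.mpr hltn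
    have a2 := Nat.lt_size.mpr hge
    unfold pvMeas
    omega

-- one recursion step of A's port, with the loop value substituted
lemma pvF_step (f : Nat) (A B K bb : Int) (hbase : ¬ max A B ≤ K)
    (hb : (work2Loop 64 (max A B) 1) >>> (1:Nat) = bb) :
    work2F (f+1) A B K =
      (if PySem.Int.band A bb ≠ 0 ∧ PySem.Int.band B bb ≠ 0 then
        if K ≥ bb then
          bb*(A+B-bb+2) + work2F f (A-bb) (B-bb) (K-bb)
        else
          work2F f (bb-1) (bb-1) K + work2F f (bb-1) (B - PySem.Int.band B bb) K +
            work2F f (A - PySem.Int.band A bb) (bb-1) K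
      else if PySem.Int.band A bb ≠ 0 then
        work2F f (bb-1) B K + work2F f (A-bb) B K
      else
        work2F f A (bb-1) K + work2F f A (B-bb) K) := by
  subst hb
  conv_lhs => rw [work2F]
  simp only [if_neg hbase]

-- A's recursion computes the same value with any sufficient fuel
lemma pvStab : ∀ (f₁ : Nat), ∀ (f₂ : Nat) (A B K : Int), Pre_work2 A B K →
    (max A B).toNat < 2^64 → pvMeas A B < f₁ → pvMeas A B < f₂ →
    work2F f₁ A B K = work2F f₂ A B K := by
  intro f₁
  induction f₁ with
  | zero => intro f₂ A B K _ _ h _; exact absurd h (Nat.not_lt_zero _)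
  | succ n ih =>
    intro f₂ A B K hpre hma h1 h2
    obtain ⟨m, rfl⟩ : ∃ m, f₂ = m + 1 := ⟨f₂ - 1, by omega⟩
    by_cases hbase : max A B ≤ K
    · simp only [work2F, if_pos hbase]
    · obtain ⟨hK, t, hb, hlow, hhigh, hmeas⟩ := pvEnv A B K hpre hbase hma
      rw [pvF_step n A B K (2^t) hbase hb, pvF_step m A B K (2^t) hbase hb]
      have hp : (2:Int)^(t+1) = 2*2^t := by ring
      have hpos : (0:Int) < 2^t := by positivity
      have hA2 : A < 2^(t+1) := lt_of_le_of_lt (le_max_left A B) hhigh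
      have hB2 : B < 2^(t+1) := lt_of_le_of_lt (le_max_right A B) hhigh
      have hchild64 : ∀ x y : Int, x < 2^t → y < 2^t → (max x y).toNat < 2^64 := by
        intro x y hx hy
        have h := pvMeas_le x y t hx hy
        have h2' : (max x y).toNat < 2^t := Nat.size_le.mp h
        have ht64 : t + 1 ≤ 64 := by
          have := Nat.size_le.mpr hma
          unfold pvMeas at hmeas
          omega
        exact lt_of_lt_of_le h2' (Nat.pow_le_pow_right (by norm_num) (by omega))
      have hmle : ∀ x y : Int, x < 2^t → y < 2^t → pvMeas x y < n ∧ pvMeas x y < m := by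
        intro x y hx hy
        have := pvMeas_le x y t hx hy
        omega
      by_cases hAB : PySem.Int.band A ((2:Int)^t) ≠ 0 ∧ PySem.Int.band B ((2:Int)^t) ≠ 0
      · rw [if_pos hAB, if_pos hAB]
        by_cases hKb : K ≥ (2:Int)^t
        · rw [if_pos hKb, if_pos hKb]
          have hx : A - 2^t < 2^t := by linarith
          have hy : B - 2^t < 2^t := by linarith
          obtain ⟨hn, hm'⟩ := hmle _ _ hx hy
          rw [ih m (A-2^t) (B-2^t) (K-2^t) (Or.inl (by linarith)) (hchild64 _ _ hx hy) hn hm']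
        · rw [if_neg hKb, if_neg hKb]
          have hbm : (2:Int)^t - 1 < 2^t := by linarith
          have hBb : B - PySem.Int.band B ((2:Int)^t) < 2^t := by
            rcases (by omega : 0 ≤ B ∨ B < 0) with hB | hB
            · rcases pvBand_cases B t hB with h0 | hbt
              · exact absurd h0 hAB.2
              · rw [hbt]; linarith
            · have := pvBand_nonneg B t; linarith
          have hAb : A - PySem.Int.band A ((2:Int)^t) < 2^t := by
            rcases (by omega : 0 ≤ A ∨ A < 0) with hA | hA
            · rcases pvBand_cases A t hA with h0 | hbt
              · exact absurd h0 hAB.1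
              · rw [hbt]; linarith
            · have := pvBand_nonneg A t; linarith
          obtain ⟨hn1, hm1⟩ := hmle _ _ hbm hbm
          obtain ⟨hn2, hm2⟩ := hmle _ _ hbm hBb
          obtain ⟨hn3, hm3⟩ := hmle _ _ hAb hbm
          rw [ih m ((2:Int)^t-1) ((2:Int)^t-1) K (Or.inl hK) (hchild64 _ _ hbm hbm) hn1 hm1,
              ih m ((2:Int)^t-1) (B - PySem.Int.band B ((2:Int)^t)) K (Or.inl hK)
                (hchild64 _ _ hbm hBb) hn2 hm2,
              ih m (A - PySem.Int.band A ((2:Int)^t)) ((2:Int)^t-1) K (Or.inl hK)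
                (hchild64 _ _ hAb hbm) hn3 hm3]
      · rw [if_neg hAB, if_neg hAB]
        have hbm : (2:Int)^t - 1 < 2^t := by linarith
        by_cases hA0 : PySem.Int.band A ((2:Int)^t) ≠ 0
        · rw [if_pos hA0, if_pos hA0]
          have hB0 : PySem.Int.band B ((2:Int)^t) = 0 := by
            by_contra h
            exact hAB ⟨hA0, h⟩
          have hB : B < 2^t := by
            rcases (by omega : 0 ≤ B ∨ B < 0) with h | h
            · exact pvLt_of_band_zero B t h hB2 hB0
            · linarith
          have hx : A - 2^t < 2^t := by linarith
          obtain ⟨hn1, hm1⟩ := hmle _ _ hbm hB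
          obtain ⟨hn2, hm2⟩ := hmle _ _ hx hB
          rw [ih m ((2:Int)^t-1) B K (Or.inl hK) (hchild64 _ _ hbm hB) hn1 hm1,
              ih m (A-2^t) B K (Or.inl hK) (hchild64 _ _ hx hB) hn2 hm2]
        · rw [if_neg hA0, if_neg hA0]
          have hA0' : PySem.Int.band A ((2:Int)^t) = 0 := not_not.mp hA0
          have hA : A < 2^t := by
            rcases (by omega : 0 ≤ A ∨ A < 0) with h | h
            · exact pvLt_of_band_zero A t h hA2 hA0'
            · linarith
          have hy : B - 2^t < 2^t := by linarith
          obtain ⟨hn1, hm1⟩ := hmle _ _ hA hbm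
          obtain ⟨hn2, hm2⟩ := hmle _ _ hA hy
          rw [ih m A ((2:Int)^t-1) K (Or.inl hK) (hchild64 _ _ hA hbm) hn1 hm1,
              ih m A (B-2^t) K (Or.inl hK) (hchild64 _ _ hA hy) hn2 hm2]

lemma pvStab' (f : Nat) (A B K : Int) (hpre : Pre_work2 A B K)
    (hma : (max A B).toNat < 2^64) (h : pvMeas A B < f) :
    work2F f A B K = pvW A B K :=
  pvStab f (pvMeas A B + 1) A B K hpre hma h (by omega)

-- the worklist invariant: sum of canonical values of the pending frames
def pvSum (l : List (Int × Int × Int)) : Int :=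
  (l.map (fun fr => pvW fr.1 fr.2.1 fr.2.2)).sum

-- termination measure of a worklist
def pvMSum (l : List (Int × Int × Int)) : Nat :=
  (l.map (fun fr => 4 ^ pvMeas fr.1 fr.2.1)).sum

-- frame-set invariant
def pvOK (l : List (Int × Int × Int)) : Prop :=
  ∀ fr ∈ l, Pre_work2 fr.1 fr.2.1 fr.2.2 ∧ (max fr.1 fr.2.1).toNat < 2^64 ∧ pvMeas fr.1 fr.2.1 < 64

-- one step of B: the contribution plus the pushed frames' canonical values equal the
-- popped frame's canonical value, and the pushed frames keep the invariant and shrink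
-- the measure
lemma pvStep (a b k : Int) (hpre : Pre_work2 a b k) (hma : (max a b).toNat < 2^64)
    (hm64 : pvMeas a b < 64) :
    (work2Step a b k).1 + pvSum (work2Step a b k).2 = pvW a b k ∧
    pvOK (work2Step a b k).2 ∧
    pvMSum (work2Step a b k).2 < 4 ^ pvMeas a b := by
  by_cases hbase : max a b ≤ k
  · have hW : pvW a b k = (a+1)*(b+1) := by
      unfold pvW
      simp only [work2F, if_pos hbase]
    simp only [work2Step, if_pos hbase]
    refine ⟨by simp [pvSum, hW], by intro fr hfr; simp at hfr, ?_⟩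
    simp only [pvMSum, List.map_nil, List.sum_nil]
    exact Nat.pow_pos (by norm_num)
  · obtain ⟨hK, t, hb, hlow, hhigh, hmeas⟩ := pvEnv a b k hpre hbase hma
    have ht : (max a b).toNat.size - 1 = t := by
      unfold pvMeas at hmeas; omega
    have hhi : (1 : Int) <<< ((max a b).toNat.size - 1) = 2^t := by
      rw [ht, Int.shiftLeft_eq]; ring
    have hp : (2:Int)^(t+1) = 2*2^t := by ring
    have hpos : (0:Int) < 2^t := by positivity
    have hA2 : a < 2^(t+1) := lt_of_le_of_lt (le_max_left a b) hhigh
    have hB2 : b < 2^(t+1) := lt_of_le_of_lt (le_max_right a b) hhigh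
    have ht64 : t + 1 < 64 := by omega
    have hchild64 : ∀ x y : Int, x < 2^t → y < 2^t → (max x y).toNat < 2^64 := by
      intro x y hx hy
      have h := pvMeas_le x y t hx hy
      have h2' : (max x y).toNat < 2^t := Nat.size_le.mp h
      exact lt_of_lt_of_le h2' (Nat.pow_le_pow_right (by norm_num) (by omega))
    have hstab : ∀ x y : Int, x < 2^t → y < 2^t → ∀ z : Int, Pre_work2 x y z →
        work2F (t+1) x y z = pvW x y z := by
      intro x y hx hy z hz
      exact pvStab' (t+1) x y z hz (hchild64 _ _ hx hy)
        (by have := pvMeas_le x y t hx hy; omega)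
    have hok1 : ∀ x y : Int, x < 2^t → y < 2^t → ∀ z : Int, Pre_work2 x y z →
        Pre_work2 x y z ∧ (max x y).toNat < 2^64 ∧ pvMeas x y < 64 := by
      intro x y hx hy z hz
      exact ⟨hz, hchild64 _ _ hx hy, by have := pvMeas_le x y t hx hy; omega⟩
    have hmm : ∀ x y : Int, x < 2^t → y < 2^t → 4 ^ pvMeas x y ≤ 4^t := by
      intro x y hx hy
      exact Nat.pow_le_pow_right (by norm_num) (pvMeas_le x y t hx hy)
    have h4 : 4 ^ pvMeas a b = 4 * 4^t := by rw [hmeas]; ring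
    have hWexp : pvW a b k = work2F (t+1+1) a b k := by
      unfold pvW; rw [hmeas]
    rw [hWexp, pvF_step (t+1) a b k (2^t) hbase hb]
    simp only [work2Step, if_neg hbase, hhi]
    have hbm : (2:Int)^t - 1 < 2^t := by linarith
    by_cases hAB : PySem.Int.band a ((2:Int)^t) ≠ 0 ∧ PySem.Int.band b ((2:Int)^t) ≠ 0
    · rw [if_pos hAB, if_pos hAB]
      by_cases hKb : k ≥ (2:Int)^t
      · rw [if_pos hKb, if_pos hKb]
        have hx : a - 2^t < 2^t := by linarith
        have hy : b - 2^t < 2^t := by linarith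
        have hz : Pre_work2 (a-2^t) (b-2^t) (k-2^t) := Or.inl (by linarith)
        refine ⟨?_, ?_, ?_⟩
        · simp only [pvSum, List.map, List.sum_cons, List.sum_nil]
          rw [← hstab _ _ hx hy _ hz]
          ring
        · intro fr hfr
          simp only [List.mem_singleton] at hfr
          subst hfr
          exact hok1 _ _ hx hy _ hz
        · simp only [pvMSum, List.map, List.sum_cons, List.sum_nil, Nat.add_zero, h4]
          have := hmm _ _ hx hy
          have h4pos : 0 < 4^t := Nat.pow_pos (by norm_num)
          omega
      · rw [if_neg hKb, if_neg hKb]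
        have hBb : b - PySem.Int.band b ((2:Int)^t) < 2^t := by
          rcases (by omega : 0 ≤ b ∨ b < 0) with hB | hB
          · rcases pvBand_cases b t hB with h0 | hbt
            · exact absurd h0 hAB.2
            · rw [hbt]; linarith
          · have := pvBand_nonneg b t; linarith
        have hAb : a - PySem.Int.band a ((2:Int)^t) < 2^t := by
          rcases (by omega : 0 ≤ a ∨ a < 0) with hA | hA
          · rcases pvBand_cases a t hA with h0 | hbt
            · exact absurd h0 hAB.1
            · rw [hbt]; linarith
          · have := pvBand_nonneg a t; linarith
        refine ⟨?_, ?_, ?_⟩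
        · simp only [pvSum, List.map, List.sum_cons, List.sum_nil]
          rw [← hstab _ _ hbm hbm _ (Or.inl hK), ← hstab _ _ hbm hBb _ (Or.inl hK),
            ← hstab _ _ hAb hbm _ (Or.inl hK)]
          ring
        · intro fr hfr
          simp only [List.mem_cons] at hfr
          rcases hfr with rfl | rfl | rfl | h
          · exact hok1 _ _ hAb hbm _ (Or.inl hK)
          · exact hok1 _ _ hbm hBb _ (Or.inl hK)
          · exact hok1 _ _ hbm hbm _ (Or.inl hK)
          · cases h
        · simp only [pvMSum, List.map, List.sum_cons, List.sum_nil, Nat.add_zero, h4]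
          have h1 := hmm _ _ hAb hbm
          have h2 := hmm _ _ hbm hBb
          have h3 := hmm _ _ hbm hbm
          have h4pos : 0 < 4^t := Nat.pow_pos (by norm_num)
          omega
    · rw [if_neg hAB, if_neg hAB]
      by_cases hA0 : PySem.Int.band a ((2:Int)^t) ≠ 0
      · rw [if_pos hA0, if_pos hA0]
        have hB0 : PySem.Int.band b ((2:Int)^t) = 0 := by
          by_contra h
          exact hAB ⟨hA0, h⟩
        have hB : b < 2^t := by
          rcases (by omega : 0 ≤ b ∨ b < 0) with h | h
          · exact pvLt_of_band_zero b t h hB2 hB0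
          · linarith
        have hx : a - 2^t < 2^t := by linarith
        refine ⟨?_, ?_, ?_⟩
        · simp only [pvSum, List.map, List.sum_cons, List.sum_nil]
          rw [← hstab _ _ hbm hB _ (Or.inl hK), ← hstab _ _ hx hB _ (Or.inl hK)]
          ring
        · intro fr hfr
          simp only [List.mem_cons] at hfr
          rcases hfr with rfl | rfl | h
          · exact hok1 _ _ hx hB _ (Or.inl hK)
          · exact hok1 _ _ hbm hB _ (Or.inl hK)
          · cases h
        · simp only [pvMSum, List.map, List.sum_cons, List.sum_nil, Nat.add_zero, h4]
          have h1 := hmm _ _ hx hB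
          have h2 := hmm _ _ hbm hB
          have h4pos : 0 < 4^t := Nat.pow_pos (by norm_num)
          omega
      · rw [if_neg hA0, if_neg hA0]
        have hA0' : PySem.Int.band a ((2:Int)^t) = 0 := not_not.mp hA0
        have hA : a < 2^t := by
          rcases (by omega : 0 ≤ a ∨ a < 0) with h | h
          · exact pvLt_of_band_zero a t h hA2 hA0'
          · linarith
        have hy : b - 2^t < 2^t := by linarith
        refine ⟨?_, ?_, ?_⟩
        · simp only [pvSum, List.map, List.sum_cons, List.sum_nil]
          rw [← hstab _ _ hA hbm _ (Or.inl hK), ← hstab _ _ hA hy _ (Or.inl hK)]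
          ring
        · intro fr hfr
          simp only [List.mem_cons] at hfr
          rcases hfr with rfl | rfl | h
          · exact hok1 _ _ hA hy _ (Or.inl hK)
          · exact hok1 _ _ hA hbm _ (Or.inl hK)
          · cases h
        · simp only [pvMSum, List.map, List.sum_cons, List.sum_nil, Nat.add_zero, h4]
          have h1 := hmm _ _ hA hy
          have h2 := hmm _ _ hA hbm
          have h4pos : 0 < 4^t := Nat.pow_pos (by norm_num)
          omega

lemma pvDrain : ∀ (f : Nat) (l : List (Int × Int × Int)) (total : Int),
    pvOK l → pvMSum l ≤ f → work2Drain f l total = total + pvSum l := by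
  intro f
  induction f with
  | zero =>
    intro l total hok hm
    cases l with
    | nil => simp [work2Drain, pvSum]
    | cons fr rest =>
      exfalso
      have : 0 < pvMSum (fr :: rest) := by
        simp only [pvMSum, List.map, List.sum_cons]
        have : 0 < 4 ^ pvMeas fr.1 fr.2.1 := Nat.pow_pos (by norm_num)
        omega
      omega
  | succ n ih =>
    intro l total hok hm
    cases l with
    | nil => simp [work2Drain, pvSum]
    | cons fr rest =>
      obtain ⟨a, b, k⟩ := fr
      obtain ⟨hpre, hma, hm64⟩ := hok (a, b, k) (List.mem_cons_self)
      obtain ⟨heq, hokc, hmc⟩ := pvStep a b k hpre hma hm64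
      have hokr : pvOK rest := fun fr h => hok fr (List.mem_cons_of_mem _ h)
      have hoka : pvOK ((work2Step a b k).2 ++ rest) := by
        intro fr h
        rcases List.mem_append.mp h with h | h
        · exact hokc fr h
        · exact hokr fr h
      have hmsplit : pvMSum ((a,b,k) :: rest) = 4 ^ pvMeas a b + pvMSum rest := by
        simp [pvMSum]
      have hmapp : pvMSum ((work2Step a b k).2 ++ rest) =
          pvMSum (work2Step a b k).2 + pvMSum rest := by
        simp [pvMSum, List.map_append, List.sum_append]
      have := ih ((work2Step a b k).2 ++ rest) (total + (work2Step a b k).1) hoka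
        (by omega)
      simp only [work2Drain, this]
      have hsapp : pvSum ((work2Step a b k).2 ++ rest) =
          pvSum (work2Step a b k).2 + pvSum rest := by
        simp [pvSum, List.map_append, List.sum_append]
      have hscons : pvSum ((a,b,k) :: rest) = pvW a b k + pvSum rest := by
        simp [pvSum]
      rw [hsapp, hscons, ← heq]
      ring

-- ===== VERDICT (by name: the statement is the Claim_ definition above) =====
theorem work2_spec : Claim_equal_work2 := by
  unfold Claim_equal_work2
  intro A B K hdom hpre
  unfold Spec_work2
  have hb : (-2147483648 ≤ A ∧ A ≤ 2147483648) ∧ (-2147483648 ≤ B ∧ B ≤ 2147483648) := by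
    unfold Dom_work2 pvDomInt at hdom
    simp only [Bool.and_eq_true, decide_eq_true_eq] at hdom
    exact ⟨hdom.1.1, hdom.1.2⟩
  have hmx : max A B ≤ 2147483648 := max_le hb.1.2 hb.2.2
  have htn : (max A B).toNat < 2^32 := by
    have h32 : (2:Nat)^32 = 4294967296 := by norm_num
    omega
  have hma64 : (max A B).toNat < 2^64 :=
    lt_of_lt_of_le htn (Nat.pow_le_pow_right (by norm_num) (by norm_num))
  have hms : pvMeas A B < 64 := by
    have := Nat.size_le.mpr htn
    unfold pvMeas
    omega
  have e1 : work2 A B K = pvW A B K := by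
    unfold work2
    exact pvStab' 64 A B K hpre hma64 hms
  have e2 : work2_alt A B K = pvW A B K := by
    unfold work2_alt
    rw [pvDrain (4^64) [(A, B, K)] 0 ?ok ?meas]
    · simp [pvSum]
    case ok =>
      intro fr hfr
      simp only [List.mem_singleton] at hfr
      subst hfr
      exact ⟨hpre, hma64, hms⟩
    case meas =>
      simp only [pvMSum, List.map, List.sum_cons, List.sum_nil, Nat.add_zero]
      exact Nat.le_of_lt (Nat.pow_lt_pow_right (by norm_num) hms)
  rw [e1, e2]
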